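-- pv_equiv track=rewrite | github.com/miliar/Code_Jam_Webscraper | solutions_python/solutions_year16_round3_nr1/434.py | solve
-- ===== SOURCE A (Python) =====
-- def solve(N,P):
--     res=''
--     if sum(P) % 2 == 1:
--         idx = P.index(max(P))
--         P[idx] -= 1
--         res += ' ' + chr(ord('A')+idx)
--     while sum(P) > 0:
--         idx1 = P.index(max(P))
--         P[idx1] -= 1
--         idx2 = P.index(max(P))
--         P[idx2] -= 1
--         res += ' ' + chr(ord('A')+idx1) + chr(ord('A')+idx2)
--     return res
-- ===== SOURCE B (Python) =====
-- # B: keep the (count, -index) pairs in an ascending sorted list; each "take one from the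
-- # current max" pops the last element and re-inserts it decremented, instead of rescanning
-- # the whole array for sum/max/index at every step as A does.  Return value only: A mutates
-- # P in place, B does not.
--
-- def _insort(xs, x):
--     # insert x into ascending xs (hand-written: no imports beyond A's)
--     k = 0
--     while k < len(xs) and xs[k] < x:
--         k += 1
--     return xs[:k] + [x] + xs[k:]
--
-- def _pick(items):
--     # items ascending by (count, -index); last element = max count, smallest index
--     c, ni = items[-1]
--     return _insort(items[:-1], (c - 1, ni)), chr(ord('A') - ni)
--
-- def solve(N, P):
--     items = sorted([(c, -i) for i, c in enumerate(P)])
--     total = sum(P)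
--     res = ''
--     if total % 2 == 1:
--         items, ch = _pick(items)
--         res += ' ' + ch
--         total -= 1
--     while total > 0:
--         items, ch1 = _pick(items)
--         items, ch2 = _pick(items)
--         res += ' ' + ch1 + ch2
--         total -= 2
--     return res
-- ===== Notes on version B (the rewrite author's own statement) =====
-- stated objective: alternative
-- what changed: A rescans the whole array for sum(P), max(P) and P.index(max(P)) at every step; B keeps (count,-index) pairs in a sorted list, pops the last element for each pick and re-inserts it decremented, maintaining the running total instead of resumming.
import Mathlib
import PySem

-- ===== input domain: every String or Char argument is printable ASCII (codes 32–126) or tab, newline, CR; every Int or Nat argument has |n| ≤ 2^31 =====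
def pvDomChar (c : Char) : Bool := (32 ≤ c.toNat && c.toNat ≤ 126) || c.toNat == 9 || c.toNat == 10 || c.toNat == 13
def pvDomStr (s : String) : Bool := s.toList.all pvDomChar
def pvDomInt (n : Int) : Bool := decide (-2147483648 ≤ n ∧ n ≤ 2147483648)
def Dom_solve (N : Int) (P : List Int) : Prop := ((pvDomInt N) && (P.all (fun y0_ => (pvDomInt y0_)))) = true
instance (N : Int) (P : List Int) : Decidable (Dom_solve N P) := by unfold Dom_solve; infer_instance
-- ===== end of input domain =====

-- B keeps the (count, -index) pairs in an ascending sorted list and pops/re-inserts the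
-- last pair per pick, instead of A's full rescans for sum/max/index at every step
-- (objective: alternative).  A mutates P in place, B does not — the equivalence proved
-- here is about the return value.

-- ===== PORT A =====
-- chr(ord('A') + idx)
def chrIdx (idx : Nat) : Char := Char.ofNat ('A'.toNat + idx)

-- idx = P.index(max(P)); P[idx] -= 1 — the two 'none' branches are unreachable at the
-- call sites (only reached with P nonempty, where Python's max/index return normally)
def solveTake (P : List Int) : List Int × Nat :=
  match PySem.List.max? P (fun y => y) with
  | none => (P, 0)
  | some m =>
    match PySem.List.index? P m with
    | none => (P, 0)
    | some idx => (P.set idx (P.getD idx 0 - 1), idx)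

-- termination helpers for the while loop (cited by decreasing_by; one take drops sum by 1)
theorem solveTake_spec (P : List Int) (hne : P ≠ []) :
    ∃ m idx, PySem.List.max? P (fun y => y) = some m ∧ PySem.List.index? P m = some idx ∧
      solveTake P = (P.set idx (P.getD idx 0 - 1), idx) := by
  rcases hm : PySem.List.max? P (fun y => y) with _ | m
  · exact absurd ((PySem.List.max?_eq_none_iff P (fun y => y)).mp hm) hne
  · rcases hidx : PySem.List.index? P m with _ | idx
    · exact absurd ((PySem.List.index?_eq_none_iff P m).mp hidx)
        (by simpa using PySem.List.max?_mem hm)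
    · exact ⟨m, idx, rfl, hidx, by simp only [solveTake, hm, hidx]⟩

theorem sum_set_int (l : List Int) : ∀ (i : Nat) (v : Int), (hi : i < l.length) →
    (l.set i v).sum = l.sum - l[i] + v := by
  induction l with
  | nil => intro i v hi; simp at hi
  | cons a t ih =>
    intro i v hi
    cases i with
    | zero => simp [List.sum_cons]; ring
    | succ n =>
      simp only [List.set_cons_succ, List.sum_cons, List.getElem_cons_succ]
      rw [ih n v (by simpa using hi)]; ring

theorem solveTake_length (P : List Int) (hne : P ≠ []) : (solveTake P).1.length = P.length := by
  obtain ⟨m, idx, -, -, hT⟩ := solveTake_spec P hne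
  rw [hT]; simp

theorem solveTake_sum (P : List Int) (hne : P ≠ []) : (solveTake P).1.sum = P.sum - 1 := by
  obtain ⟨m, idx, hm, hidx, hT⟩ := solveTake_spec P hne
  obtain ⟨hk, hPk, -⟩ := PySem.List.getElem_of_index?_eq_some hidx
  rw [hT]
  dsimp only
  rw [sum_set_int P idx _ hk, List.getD_eq_getElem P 0 hk]
  ring

-- while sum(P) > 0: take twice, append ' ' + the two letters
def solveLoop (P : List Int) (res : List Char) : List Char :=
  if h : 0 < P.sum then
    let t1 := solveTake P
    let t2 := solveTake t1.1
    solveLoop t2.1 (res ++ [' ', chrIdx t1.2, chrIdx t2.2])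
  else res
termination_by P.sum.toNat
decreasing_by
  have hne : P ≠ [] := by rintro rfl; simp at h
  have h1 : t1.1.sum = P.sum - 1 := solveTake_sum P hne
  have hne2 : t1.1 ≠ [] := by
    have hl := solveTake_length P hne
    intro hnil; rw [hnil] at hl; exact hne (List.eq_nil_of_length_eq_zero hl.symm)
  have h2 : t2.1.sum = P.sum - 2 := by rw [solveTake_sum t1.1 hne2, h1]; ring
  rw [h2]; omega

def solve (N : Int) (P : List Int) : String :=
  if PySem.Int.mod P.sum 2 == 1 then
    let t := solveTake P
    String.mk (solveLoop t.1 [' ', chrIdx t.2])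
  else
    String.mk (solveLoop P [])

-- ===== PORT B =====
-- Python tuple comparison (c, ni) < (c', ni') — lexicographic on Int pairs
def pairLt (a b : Int × Int) : Bool := a.1 < b.1 || (a.1 == b.1 && a.2 < b.2)

-- _insort: Source B's linear scan for the insertion point, as structural recursion
def insortAlt (x : Int × Int) : List (Int × Int) → List (Int × Int)
  | [] => [x]
  | y :: ys => if pairLt y x then y :: insortAlt x ys else x :: y :: ys

-- _pick: pop the last (= maximal) pair, re-insert it decremented; the 'none' branch is
-- unreachable at the call sites (only picked while total > 0, so items is nonempty)
def pickAlt (items : List (Int × Int)) : List (Int × Int) × Char :=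
  match items.getLast? with
  | none => ([], ' ')
  | some (c, ni) => (insortAlt (c - 1, ni) items.dropLast, Char.ofNat ((65 - ni).toNat))

-- while total > 0: pick twice
def loopAlt (items : List (Int × Int)) (total : Int) (res : List Char) : List Char :=
  if 0 < total then
    let p1 := pickAlt items
    let p2 := pickAlt p1.1
    loopAlt p2.1 (total - 2) (res ++ [' ', p1.2, p2.2])
  else res
termination_by total.toNat
decreasing_by omega

-- sorted([(c, -i) for i, c in enumerate(P)]): Python's builtin sorted on int pairs,
-- ported as PySem.List.sorted with the lexicographic key (= Python tuple comparison)
def solve_alt (N : Int) (P : List Int) : String :=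
  let items := PySem.List.sorted ((PySem.List.enumerate P).map (fun p => (p.2, -p.1)))
    (fun p => toLex p) false
  let total := P.sum
  if PySem.Int.mod total 2 == 1 then
    let p := pickAlt items
    String.mk (loopAlt p.1 (total - 1) [' ', p.2])
  else
    String.mk (loopAlt items total [])

-- ===== PRECONDITION & SPEC =====
def Spec_solve (N : Int) (P : List Int) (out : String) : Prop := out = solve_alt N P
instance (N : Int) (P : List Int) (out : String) : Decidable (Spec_solve N P out) := by unfold Spec_solve; infer_instance

-- ===== CLAIM (what is proved, stated in full; the proofs are below) =====
def Claim_equal_solve : Prop := ∀ (N : Int) (P : List Int), Dom_solve N P → Spec_solve N P (solve N P)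


-- ===== LEMMAS AND PROOFS =====

-- the multiset of (count, -index) pairs that B's sorted list represents
def msP (P : List Int) : List (Int × Int) :=
  (PySem.List.enumerate P).map (fun p => (p.2, -p.1))

-- B's loop invariant: items is strictly sorted and is a rearrangement of msP P
def BInv (P : List Int) (items : List (Int × Int)) : Prop :=
  items.Pairwise (fun a b => pairLt a b = true) ∧ items.Perm (msP P)

theorem pairLt_irrefl (a : Int × Int) : pairLt a a = false := by simp [pairLt]

theorem pairLt_trans {a b c : Int × Int} (h1 : pairLt a b = true) (h2 : pairLt b c = true) :
    pairLt a c = true := by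
  simp only [pairLt, Bool.or_eq_true, decide_eq_true_eq, Bool.and_eq_true, beq_iff_eq] at *
  omega

theorem pairLt_total {a b : Int × Int} (h : ¬ pairLt a b = true) (hne : a ≠ b) :
    pairLt b a = true := by
  rcases a with ⟨a1, a2⟩; rcases b with ⟨b1, b2⟩
  simp only [pairLt, Bool.or_eq_true, decide_eq_true_eq, Bool.and_eq_true, beq_iff_eq,
    not_or, not_and] at h ⊢
  by_cases h1 : a1 = b1
  · subst h1
    have h2 : a2 ≠ b2 := fun hc => hne (by rw [hc])
    have h3 := h.2 rfl
    right; exact ⟨rfl, by omega⟩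
  · left; omega

theorem pairLt_ne {a b : Int × Int} (h : pairLt a b = true) : a ≠ b := by
  rintro rfl; rw [pairLt_irrefl] at h; exact Bool.false_ne_true h

theorem insortAlt_perm (x : Int × Int) (l : List (Int × Int)) :
    (insortAlt x l).Perm (x :: l) := by
  induction l with
  | nil => simp [insortAlt]
  | cons y ys ih =>
    simp only [insortAlt]
    by_cases hc : pairLt y x = true
    · rw [if_pos hc]
      exact ((ih.cons y).trans (List.Perm.swap x y ys))
    · rw [if_neg hc]

theorem insortAlt_pairwise (x : Int × Int) (l : List (Int × Int))
    (hs : l.Pairwise (fun a b => pairLt a b = true)) (hne : ∀ y ∈ l, y ≠ x) :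
    (insortAlt x l).Pairwise (fun a b => pairLt a b = true) := by
  induction l with
  | nil => simp [insortAlt]
  | cons y ys ih =>
    rcases List.pairwise_cons.mp hs with ⟨hy, hys⟩
    simp only [insortAlt]
    by_cases hc : pairLt y x = true
    · rw [if_pos hc]
      refine List.pairwise_cons.mpr ⟨?_, ih hys (fun z hz => hne z (by simp [hz]))⟩
      intro z hz
      rcases List.mem_cons.mp ((insortAlt_perm x ys).mem_iff.mp hz) with rfl | hmem
      · exact hc
      · exact hy z hmem
    · rw [if_neg hc]
      have hxy : pairLt x y = true := pairLt_total hc (hne y (by simp))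
      refine List.pairwise_cons.mpr ⟨?_, List.pairwise_cons.mpr ⟨hy, hys⟩⟩
      intro z hz
      rcases List.mem_cons.mp hz with rfl | hmem
      · exact hxy
      · exact pairLt_trans hxy (hy z hmem)

-- characterising msP elementwise
theorem length_msP (P : List Int) : (msP P).length = P.length := by
  simp [msP]

theorem getElem_msP (P : List Int) (k : Nat) (hk : k < P.length) :
    (msP P)[k]'(by rw [length_msP]; exact hk) = (P[k], -(k : Int)) := by
  simp [msP, PySem.List.getElem_enumerate]

theorem mem_msP_iff {P : List Int} {p : Int × Int} :
    p ∈ msP P ↔ ∃ (k : Nat) (hk : k < P.length), p = (P[k], -(k : Int)) := by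
  constructor
  · intro hp
    obtain ⟨q, hq, hpq⟩ := List.mem_map.mp hp
    obtain ⟨k, hk, rfl⟩ := (PySem.List.mem_enumerate_iff P 0 q).mp hq
    exact ⟨k, hk, by simpa using hpq.symm⟩
  · rintro ⟨k, hk, rfl⟩
    rw [← getElem_msP P k hk]
    exact List.getElem_mem _

theorem nodup_msP (P : List Int) : (msP P).Nodup := by
  have h := PySem.List.pairwise_lt_enumerate P 0
  have h2 : (msP P).Pairwise (fun a b => b.2 < a.2) := by
    unfold msP
    exact (List.pairwise_map).mpr (h.imp (by intro a b hab; simpa using hab))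
  exact h2.imp (by intro a b hab; rintro rfl; omega)

-- decomposing msP of an updated list around the updated position
theorem enum_map_set : ∀ (P : List Int) (s : Int) (idx : Nat) (v : Int), idx < P.length →
    ((PySem.List.enumerate (P.set idx v) s).map (fun p => (p.2, -p.1))) =
      ((PySem.List.enumerate P s).map (fun p => (p.2, -p.1))).take idx ++
        (v, -(s + idx)) ::
        ((PySem.List.enumerate P s).map (fun p => (p.2, -p.1))).drop (idx + 1) := by
  intro P
  induction P with
  | nil => intro s idx v h; simp at h
  | cons a t ih =>
    intro s idx v h
    cases idx with
    | zero => simp [PySem.List.enumerate_cons]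
    | succ n =>
      have hn : n < t.length := by simpa using h
      simp only [List.set_cons_succ, PySem.List.enumerate_cons, List.map_cons,
        List.take_succ_cons, List.drop_succ_cons]
      rw [ih (s + 1) n v hn]
      have harith : s + 1 + (n : Int) = s + ((n + 1 : Nat) : Int) := by push_cast; ring
      rw [harith]
      simp

theorem msP_set_decomp (P : List Int) (idx : Nat) (hk : idx < P.length) (v : Int) :
    msP (P.set idx v) =
      (msP P).take idx ++ (v, -(idx : Int)) :: (msP P).drop (idx + 1) := by
  have h := enum_map_set P 0 idx v hk
  simpa [msP] using h

theorem msP_decomp (P : List Int) (idx : Nat) (hk : idx < P.length) :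
    msP P = (msP P).take idx ++ (P[idx], -(idx : Int)) :: (msP P).drop (idx + 1) := by
  have h := msP_set_decomp P idx hk P[idx]
  rwa [List.set_getElem_self hk] at h

-- the last element of a strictly sorted list whose other elements lie below z is z
theorem getLast?_of_max : ∀ (l : List (Int × Int)) (z : Int × Int),
    l.Pairwise (fun a b => pairLt a b = true) → z ∈ l →
    (∀ y ∈ l, y ≠ z → pairLt y z = true) → l.getLast? = some z := by
  intro l
  induction l with
  | nil => intro z _ hz _; simp at hz
  | cons x xs ih =>
    intro z hpw hz hmax
    cases xs with
    | nil =>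
      rcases List.mem_cons.mp hz with rfl | h
      · rfl
      · simp at h
    | cons w ws =>
      rcases List.pairwise_cons.mp hpw with ⟨hx, hpw'⟩
      have hzxs : z ∈ w :: ws := by
        rcases List.mem_cons.mp hz with rfl | h
        · exfalso
          have hwne : w ≠ z := by
            intro hwz
            have hlt := hx w (by simp)
            rw [hwz] at hlt
            exact pairLt_ne hlt rfl
          have h1 := hmax w (by simp) hwne
          have h2 := hx w (by simp)
          exact pairLt_ne (pairLt_trans h1 h2) rfl
        · exact h
      rw [List.getLast?_cons_cons]
      exact ih z hpw' hzxs (fun y hy hyne => hmax y (by simp [hy]) hyne)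

-- step lemma: one pick on B's side matches one take on A's side and keeps the invariant
theorem step_eq (P : List Int) (items : List (Int × Int)) (hne : P ≠ [])
    (hinv : BInv P items) :
    (pickAlt items).2 = chrIdx (solveTake P).2 ∧ BInv (solveTake P).1 (pickAlt items).1 := by
  obtain ⟨m, idx, hm, hidx, hTake⟩ := solveTake_spec P hne
  obtain ⟨hk, hPk, hfirst⟩ := PySem.List.getElem_of_index?_eq_some hidx
  have hmax : ∀ y ∈ P, y ≤ m := PySem.List.max?_isMax hm
  obtain ⟨hpw, hperm⟩ := hinv
  have hzmem : ((m, -(idx : Int)) : Int × Int) ∈ msP P :=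
    mem_msP_iff.mpr ⟨idx, hk, by rw [hPk]⟩
  have hzmax : ∀ y ∈ msP P, y ≠ ((m, -(idx : Int)) : Int × Int) →
      pairLt y (m, -(idx : Int)) = true := by
    intro y hy hne'
    obtain ⟨k, hk', rfl⟩ := mem_msP_iff.mp hy
    have hle : P[k] ≤ m := hmax _ (List.getElem_mem hk')
    by_cases hkm : P[k] = m
    · have hkneq : k ≠ idx := by rintro rfl; exact hne' (by rw [hkm])
      have hklt : idx < k := by
        rcases Nat.lt_or_ge k idx with h' | h'
        · exact absurd hkm (hfirst k h')
        · omega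
      simp only [pairLt, Bool.or_eq_true, decide_eq_true_eq, Bool.and_eq_true, beq_iff_eq]
      right; constructor
      · exact hkm
      · omega
    · simp only [pairLt, Bool.or_eq_true, decide_eq_true_eq, Bool.and_eq_true, beq_iff_eq]
      left; omega
  have hlast : items.getLast? = some ((m, -(idx : Int)) : Int × Int) :=
    getLast?_of_max items _ hpw (hperm.mem_iff.mpr hzmem)
      (fun y hy => hzmax y (hperm.mem_iff.mp hy))
  have hne_items : items ≠ [] := by rintro rfl; simp at hlast
  have hlastval : items.getLast hne_items = ((m, -(idx : Int)) : Int × Int) := by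
    have := List.getLast?_eq_some_getLast hne_items
    rw [hlast] at this
    exact (Option.some_inj.mp this).symm
  have hdecomp : items.dropLast ++ [((m, -(idx : Int)) : Int × Int)] = items := by
    rw [← hlastval]; exact List.dropLast_concat_getLast hne_items
  have hpick : pickAlt items =
      (insortAlt (m - 1, -(idx : Int)) items.dropLast,
        Char.ofNat ((65 - -(idx : Int)).toNat)) := by
    unfold pickAlt; rw [hlast]
  have hdlsub : ∀ y ∈ items.dropLast, y ∈ items :=
    fun y hy => (List.dropLast_sublist items).subset hy
  constructor
  · rw [hpick, hTake]
    simp only [chrIdx]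
    congr 1
    have hA : 'A'.toNat = 65 := rfl
    rw [hA]; omega
  · rw [hpick, hTake]
    dsimp only
    have hgetD : P.getD idx 0 = m := by rw [List.getD_eq_getElem P 0 hk, hPk]
    rw [hgetD]
    constructor
    · apply insortAlt_pairwise
      · exact hpw.sublist (List.dropLast_sublist items)
      · intro y hy hyx
        obtain ⟨k, hk', hky⟩ := mem_msP_iff.mp (hperm.mem_iff.mp (hdlsub y hy))
        rw [hky] at hyx
        have hkidx : k = idx := by
          have := congrArg Prod.snd hyx
          simp at this
          omega
        subst hkidx
        have := congrArg Prod.fst hyx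
        simp [hPk] at this
        omega
    · have hperm2 : (((m, -(idx : Int)) : Int × Int) :: items.dropLast).Perm (msP P) := by
        have hp1 : (items.dropLast ++ [((m, -(idx : Int)) : Int × Int)]).Perm
            (((m, -(idx : Int)) : Int × Int) :: items.dropLast) := by
          simpa using (List.perm_middle (a := ((m, -(idx : Int)) : Int × Int))
            (l₁ := items.dropLast) (l₂ := []))
        have hp2 := hp1.symm
        rw [hdecomp] at hp2
        exact hp2.trans hperm
      rw [msP_set_decomp P idx hk (m - 1)]
      refine (insortAlt_perm _ _).trans ?_
      refine List.Perm.trans ?_ List.perm_middle.symm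
      refine List.Perm.cons _ ?_
      have h3 : (msP P).Perm (((m, -(idx : Int)) : Int × Int) ::
          ((msP P).take idx ++ (msP P).drop (idx + 1))) := by
        conv_lhs => rw [msP_decomp P idx hk]
        rw [hPk]
        exact List.perm_middle
      exact (hperm2.trans h3).cons_inv

-- loop equivalence by strong induction on the running total
theorem loop_eq : ∀ (n : Nat) (P : List Int) (items : List (Int × Int)) (total : Int)
    (res : List Char), total = P.sum → BInv P items → total.toNat ≤ n →
    solveLoop P res = loopAlt items total res := by
  intro n
  induction n with
  | zero =>
    intro P items total res htot hinv hle
    have h0 : ¬ 0 < total := by omega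
    rw [solveLoop, loopAlt, dif_neg (htot ▸ h0), if_neg h0]
  | succ n ih =>
    intro P items total res htot hinv hle
    by_cases hpos : 0 < total
    · have hsum : 0 < P.sum := htot ▸ hpos
      have hneP : P ≠ [] := by rintro rfl; simp at hsum
      obtain ⟨hchar1, hinv1⟩ := step_eq P items hneP hinv
      have hlen1 := solveTake_length P hneP
      have hsum1 := solveTake_sum P hneP
      have hneP1 : (solveTake P).1 ≠ [] := by
        intro hnil; rw [hnil] at hlen1
        exact hneP (List.eq_nil_of_length_eq_zero hlen1.symm)
      obtain ⟨hchar2, hinv2⟩ := step_eq _ _ hneP1 hinv1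
      have hsum2 := solveTake_sum _ hneP1
      rw [solveLoop, loopAlt, dif_pos hsum, if_pos hpos]
      dsimp only
      rw [← hchar1, ← hchar2]
      exact ih _ _ _ _ (by omega) hinv2 (by omega)
    · rw [solveLoop, loopAlt, dif_neg (htot ▸ hpos), if_neg hpos]

-- the initial builtin sort yields a strictly sorted rearrangement of msP P
theorem init_inv (P : List Int) :
    BInv P (PySem.List.sorted ((PySem.List.enumerate P).map (fun p => (p.2, -p.1)))
      (fun p => toLex p) false) := by
  have hperm : (PySem.List.sorted (msP P) (fun p => toLex p) false).Perm (msP P) :=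
    PySem.List.sorted_perm (msP P) (fun p => toLex p) false
  have hle := PySem.List.sorted_pairwise (msP P) (fun p => toLex p)
  have hnd : (PySem.List.sorted (msP P) (fun p => toLex p) false).Nodup :=
    (hperm.nodup_iff).mpr (nodup_msP P)
  refine ⟨?_, hperm⟩
  have hcomb := hle.and hnd
  refine hcomb.imp ?_
  intro a b hab
  have hlt : toLex a < toLex b := lt_of_le_of_ne hab.1 (fun hc => hab.2 (toLex.injective hc))
  rw [Prod.Lex.lt_iff] at hlt
  simp only [pairLt, Bool.or_eq_true, decide_eq_true_eq, Bool.and_eq_true, beq_iff_eq]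
  simpa using hlt

-- ===== VERDICT (by name: the statement is the Claim_ definition above) =====
theorem solve_spec : Claim_equal_solve := by
  intro N P _
  unfold Spec_solve solve solve_alt
  by_cases hodd : (PySem.Int.mod P.sum 2 == 1) = true
  · rw [if_pos hodd, if_pos hodd]
    dsimp only
    have hneP : P ≠ [] := by rintro rfl; exact absurd hodd (by decide)
    obtain ⟨hchar, hinv1⟩ := step_eq P _ hneP (init_inv P)
    have hsum1 := solveTake_sum P hneP
    congr 1
    rw [← hchar]
    exact loop_eq (P.sum - 1).toNat _ _ _ _ (by omega) hinv1 le_rfl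
  · rw [if_neg hodd, if_neg hodd]
    congr 1
    exact loop_eq P.sum.toNat P _ P.sum [] rfl (init_inv P) le_rfl
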